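-- pv_equiv track=rewrite | github.com/sammdot/circa | modules/sed.py | mklist
-- ===== SOURCE A (Python) =====
-- import string
--
-- all = [chr(i) for i in range(256)]
--
-- def mklist(src):
-- 	src = src.replace("\\/", "/") \
-- 		.replace("[:upper:]", string.ascii_uppercase) \
-- 		.replace("[:lower:]", string.ascii_lowercase) \
-- 		.replace("[:alpha:]", string.ascii_letters) \
-- 		.replace("[:digit:]", string.digits) \
-- 		.replace("[:xdigit:]", string.hexdigits) \
-- 		.replace("[:alnum:]", string.digits + string.ascii_letters) \
-- 		.replace("[:blank:]", string.whitespace) \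
-- 		.replace("[:punct:]", string.punctuation) \
-- 		.replace("[:cntrl:]", "".join([i for i in all if i not in string.printable])) \
-- 		.replace("[:print:]", string.printable)
-- 	lst = []
-- 	bs = False
-- 	hy = False
-- 	for ch in src:
-- 		if ch == "\\":
-- 			if not bs: bs = True
-- 			continue
-- 		elif ch == "-" and not bs:
-- 			hy = True
-- 			continue
-- 		elif hy:
-- 			lst.extend(range(lst[-1] + 1, ord(ch)))
-- 		lst.append(ord(ch))
-- 		bs = False
-- 		hy = False
-- 	return "".join([chr(i) for i in lst])
-- ===== SOURCE B (Python) =====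
-- import string
--
-- all = [chr(i) for i in range(256)]
--
-- def mklist(src):
-- 	src = src.replace("\\/", "/") \
-- 		.replace("[:upper:]", string.ascii_uppercase) \
-- 		.replace("[:lower:]", string.ascii_lowercase) \
-- 		.replace("[:alpha:]", string.ascii_letters) \
-- 		.replace("[:digit:]", string.digits) \
-- 		.replace("[:xdigit:]", string.hexdigits) \
-- 		.replace("[:alnum:]", string.digits + string.ascii_letters) \
-- 		.replace("[:blank:]", string.whitespace) \
-- 		.replace("[:punct:]", string.punctuation) \
-- 		.replace("[:cntrl:]", "".join([i for i in all if i not in string.printable])) \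
-- 		.replace("[:print:]", string.printable)
-- 	# pass 1: resolve backslash-escape state into tokens (is_range_op, codepoint)
-- 	tokens = []
-- 	bs = False
-- 	for ch in src:
-- 		if ch == "\\":
-- 			bs = True  # sticky, as in sed.py: a second backslash keeps the state
-- 		elif ch == "-" and not bs:
-- 			tokens.append((True, 0))
-- 		else:
-- 			tokens.append((False, ord(ch)))
-- 			bs = False
-- 	# pass 2: expand range operators against the previously emitted code point
-- 	out = []
-- 	pending = False
-- 	for isop, code in tokens:
-- 		if isop:
-- 			pending = True
-- 		else:
-- 			if pending:
-- 				out.extend(range(out[-1] + 1, code))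
-- 			out.append(code)
-- 			pending = False
-- 	return "".join([chr(i) for i in out])
-- ===== Notes on version B (the rewrite author's own statement) =====
-- stated objective: alternative
-- what changed: A's single stateful scan (bs/hy flags with in-loop range extension) is re-decomposed into two passes: a tokenizer that resolves the sticky backslash-escape state into (range-op | literal codepoint) tokens, then a separate expander that turns range-op tokens into code-point ranges against the previously emitted character.
import Mathlib
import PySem

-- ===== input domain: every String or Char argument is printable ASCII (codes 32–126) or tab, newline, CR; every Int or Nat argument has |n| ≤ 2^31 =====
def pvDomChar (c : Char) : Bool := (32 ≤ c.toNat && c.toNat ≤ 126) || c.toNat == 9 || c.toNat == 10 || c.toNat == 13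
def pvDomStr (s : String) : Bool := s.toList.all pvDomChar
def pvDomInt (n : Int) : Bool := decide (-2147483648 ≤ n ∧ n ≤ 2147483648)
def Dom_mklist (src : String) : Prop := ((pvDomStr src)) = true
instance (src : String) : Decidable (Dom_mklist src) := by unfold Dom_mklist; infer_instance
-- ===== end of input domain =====

-- B re-decomposes A's single stateful scan into two passes (tokenize escape state, then expand
-- ranges); objective: alternative decomposition, same observable behaviour and cost.

-- shared module-level context of Source A: `all`, string.printable, and the replace chain
def allChars : List Char := (List.range 256).map Char.ofNat

def printableStr : String := "0123456789abcdefghijklmnopqrstuvwxyzABCDEFGHIJKLMNOPQRSTUVWXYZ!\"#$%&'()*+,-./:;<=>?@[\\]^_`{|}~ \t\n\r\x0B\x0C"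

def cntrlChars : List Char := allChars.filter (fun c => !(c ∈ printableStr.toList))

def sedReplace (s : List Char) : List Char :=
  PySem.Chars.replace (PySem.Chars.replace (PySem.Chars.replace (PySem.Chars.replace
    (PySem.Chars.replace (PySem.Chars.replace (PySem.Chars.replace (PySem.Chars.replace
    (PySem.Chars.replace (PySem.Chars.replace (PySem.Chars.replace
    s "\\/".toList "/".toList)
    "[:upper:]".toList "ABCDEFGHIJKLMNOPQRSTUVWXYZ".toList)
    "[:lower:]".toList "abcdefghijklmnopqrstuvwxyz".toList)
    "[:alpha:]".toList "abcdefghijklmnopqrstuvwxyzABCDEFGHIJKLMNOPQRSTUVWXYZ".toList)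
    "[:digit:]".toList "0123456789".toList)
    "[:xdigit:]".toList "0123456789abcdefABCDEF".toList)
    "[:alnum:]".toList "0123456789abcdefghijklmnopqrstuvwxyzABCDEFGHIJKLMNOPQRSTUVWXYZ".toList)
    "[:blank:]".toList " \t\n\r\x0B\x0C".toList)
    "[:punct:]".toList "!\"#$%&'()*+,-./:;<=>?@[\\]^_`{|}~".toList)
    "[:cntrl:]".toList cntrlChars)
    "[:print:]".toList printableStr.toList

-- ===== PORT A =====
-- A's single loop over the replaced string with state (lst, bs, hy); lst[-1] on an empty lst is
-- an IndexError in Python (excluded by Pre_mklist below); the port totalises it with getD 0.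
def mklistLoop : List Char → List Int → Bool → Bool → List Int
  | [], lst, _, _ => lst
  | c :: rest, lst, bs, hy =>
    if c = '\\' then mklistLoop rest lst true hy
    else if c = '-' ∧ bs = false then mklistLoop rest lst bs true
    else
      let lst1 := if hy then
          lst ++ PySem.List.pyRange (((PySem.List.pyGet? lst (-1)).getD 0) + 1) (c.toNat : Int) 1
        else lst
      mklistLoop rest (lst1 ++ [(c.toNat : Int)]) false false

def mklist (src : String) : String :=
  String.ofList ((mklistLoop (sedReplace src.toList) [] false false).map (fun i => Char.ofNat i.toNat))

-- ===== PORT B =====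
-- pass 1: resolve the sticky backslash state into tokens (isRangeOp, codepoint)
def mklistTok : List Char → Bool → List (Bool × Int)
  | [], _ => []
  | c :: rest, bs =>
    if c = '\\' then mklistTok rest true
    else if c = '-' ∧ bs = false then (true, 0) :: mklistTok rest bs
    else (false, (c.toNat : Int)) :: mklistTok rest false

-- pass 2: expand a pending range operator against the previously emitted code point
-- (out[-1] on empty out is the same IndexError, excluded by Pre_mklist; totalised with getD 0)
def mklistEmit : List (Bool × Int) → List Int → Bool → List Int
  | [], out, _ => out
  | (isop, code) :: rest, out, pending =>
    if isop then mklistEmit rest out true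
    else
      let out1 := if pending then
          out ++ PySem.List.pyRange (((PySem.List.pyGet? out (-1)).getD 0) + 1) code 1
        else out
      mklistEmit rest (out1 ++ [code]) false

def mklist_alt (src : String) : String :=
  String.ofList ((mklistEmit (mklistTok (sedReplace src.toList) false) [] false).map
    (fun i => Char.ofNat i.toNat))

-- ===== PRECONDITION & SPEC =====
-- Pre_ excludes exactly the inputs on which the Python A raises IndexError (lst[-1] on an empty
-- list): those whose replaced form starts with an unescaped hyphen and contains a later char
-- that gets emitted. My B raises there too.
def Pre_mklist (src : String) : Prop :=
  (sedReplace src.toList).head? ≠ some '-' ∨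
    (((sedReplace src.toList).dropWhile (· = '-')).dropWhile (· = '\\')) = []
instance (src : String) : Decidable (Pre_mklist src) := by unfold Pre_mklist; infer_instance

def pvWitness_mklist : String := "a-z"

def Spec_mklist (src : String) (out : String) : Prop := out = mklist_alt src
instance (src : String) (out : String) : Decidable (Spec_mklist src out) := by unfold Spec_mklist; infer_instance

-- ===== CLAIM (what is proved, stated in full; the proofs are below) =====
def Claim_equal_mklist : Prop := ∀ (src : String), Dom_mklist src → Pre_mklist src → Spec_mklist src (mklist src)

-- ===== LEMMAS AND PROOFS =====
-- tokenizing then emitting is the same state machine as A's single scan, for every state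
theorem emit_tok_eq_loop (s : List Char) : ∀ (bs hy : Bool) (lst : List Int),
    mklistEmit (mklistTok s bs) lst hy = mklistLoop s lst bs hy := by
  induction s with
  | nil => intro bs hy lst; simp [mklistTok, mklistEmit, mklistLoop]
  | cons c rest ih =>
    intro bs hy lst
    by_cases h1 : c = '\\'
    · simp [mklistTok, mklistLoop, h1, ih]
    · by_cases h2 : c = '-' ∧ bs = false
      · simp [mklistTok, mklistLoop, mklistEmit, h2, ih]
      · simp [mklistTok, mklistLoop, mklistEmit, h1, h2, ih]

-- ===== VERDICT (by name: the statement is the Claim_ definition above) =====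
theorem mklist_spec : Claim_equal_mklist := by
  intro src _ _
  show mklist src = mklist_alt src
  unfold mklist mklist_alt
  rw [emit_tok_eq_loop]
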